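-- pv_equiv track=rewrite | github.com/pygame-examples/pygame-examples | pgex/wip_examples/map_regions/main.py | find_shape
-- ===== SOURCE A (Python) =====
-- def find_shape(pos, array):
--     directions = ((-1, -1), (0, -1), (1, -1), (1, 0), (1, 1), (0, 1), (-1, 1), (-1, 0))
--     value = array[pos[1]][pos[0]]
--     positions = {pos}
--     border = {pos}
--
--     while True:
--         temp_borders = set()
--         for pos in border:
--             for dx, dy in directions:
--                 new_pos = (pos[0] + dx, pos[1] + dy)
--                 if new_pos in positions:
--                     continue
--                 try:
--                     new_value = array[new_pos[1]][new_pos[0]]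
--                 except IndexError:
--                     continue
--                 if new_value == value:
--                     temp_borders.add(new_pos)
--         if not border:
--             x_positions, y_positions = [], []
--             for x, y in positions:
--                 x_positions.append(x)
--                 y_positions.append(y)
--             origin_x, origin_y = min(x_positions), min(y_positions)
--             width = max(x_positions) - origin_x
--             height = max(y_positions) - origin_y
--             new_array = [
--                 [
--                     1 if (x + origin_x, y + origin_y) in positions else 0
--                     for x in range(width)
--                 ]
--                 for y in range(height)
--             ]
--             return new_array, (origin_x, origin_y)
--
--         border = temp_borders
--         positions |= temp_borders
-- ===== SOURCE B (Python) =====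
-- def find_shape(pos, array):
--     directions = ((-1, -1), (0, -1), (1, -1), (1, 0), (1, 1), (0, 1), (-1, 1), (-1, 0))
--     value = array[pos[1]][pos[0]]
--     positions = {pos}
--     stack = [pos]
--
--     while stack:
--         x, y = stack.pop()
--         for dx, dy in directions:
--             new_pos = (x + dx, y + dy)
--             if new_pos in positions:
--                 continue
--             try:
--                 new_value = array[new_pos[1]][new_pos[0]]
--             except IndexError:
--                 continue
--             if new_value == value:
--                 positions.add(new_pos)
--                 stack.append(new_pos)
--
--     origin_x = min(x for x, _ in positions)
--     origin_y = min(y for _, y in positions)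
--     width = max(x for x, _ in positions) - origin_x
--     height = max(y for _, y in positions) - origin_y
--     new_array = [
--         [1 if (x + origin_x, y + origin_y) in positions else 0 for x in range(width)]
--         for y in range(height)
--     ]
--     return new_array, (origin_x, origin_y)
-- ===== Notes on version B (the rewrite author's own statement) =====
-- stated objective: alternative
-- what changed: Replaces A's layer-by-layer frontier BFS (border/temp_borders sets, positions |= layer each round) with a single LIFO-worklist flood fill that pops one cell at a time and pushes newly discovered equal-valued neighbours, keeping the identical raw neighbour lookup (negative-index wrap, IndexError skipped) and the identical bounding-box mask arithmetic.
import Mathlib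
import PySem

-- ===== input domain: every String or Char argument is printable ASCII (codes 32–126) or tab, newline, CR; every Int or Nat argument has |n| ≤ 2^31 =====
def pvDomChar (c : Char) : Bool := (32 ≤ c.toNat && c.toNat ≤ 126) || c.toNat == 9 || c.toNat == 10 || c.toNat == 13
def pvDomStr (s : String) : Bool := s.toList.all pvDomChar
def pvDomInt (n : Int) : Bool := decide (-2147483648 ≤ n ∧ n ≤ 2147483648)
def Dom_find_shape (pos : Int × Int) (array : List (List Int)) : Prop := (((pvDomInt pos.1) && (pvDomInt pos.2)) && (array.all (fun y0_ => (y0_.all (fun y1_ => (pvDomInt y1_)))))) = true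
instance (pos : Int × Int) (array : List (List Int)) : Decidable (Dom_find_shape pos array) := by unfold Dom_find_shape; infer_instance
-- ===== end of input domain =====

-- B replaces A's layer-by-layer frontier BFS (border / temp_borders sets) by a single
-- LIFO-worklist flood fill; same neighbour lookup (negative indices wrap, IndexError
-- skipped) and the same width/height mask arithmetic, so the return value is identical.

-- array[q.2][q.1] with Python indexing; none = IndexError (used by both ports).
def pvLookup (array : List (List Int)) (q : Int × Int) : Option Int :=
  match PySem.List.pyGet? array q.2 with
  | none => none
  | some row => PySem.List.pyGet? row q.1

-- the 8 directions, in A's (and B's) order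
def pvDirs : List (Int × Int) :=
  [(-1, -1), (0, -1), (1, -1), (1, 0), (1, 1), (0, 1), (-1, 1), (-1, 0)]

-- the bounding-box mask built after the flood fill — textually identical in A and B
-- (min/max over a set and pure membership tests: independent of set iteration order).
def pvBuildMask (positions : PySem.Set (Int × Int)) : List (List Int) × (Int × Int) :=
  let xs := positions.map Prod.fst
  let ys := positions.map Prod.snd
  let ox := (PySem.List.min? xs (fun v => v)).getD 0
  let oy := (PySem.List.min? ys (fun v => v)).getD 0
  let w := (PySem.List.max? xs (fun v => v)).getD 0 - ox
  let h := (PySem.List.max? ys (fun v => v)).getD 0 - oy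
  ((PySem.List.pyRange 0 h).map (fun y =>
      (PySem.List.pyRange 0 w).map (fun x =>
        if positions.contains (x + ox, y + oy) then (1 : Int) else 0)),
   (ox, oy))

-- ===== PORT A =====

def pvWidthBound (array : List (List Int)) : Nat :=
  array.foldl (fun m row => max m row.length) 0

-- every cell Python can read (incl. by negative-index wrap) lies in this finite list;
-- its length only feeds the fuel making the while-loops total (proved sufficient below)
def pvCells (array : List (List Int)) : List (Int × Int) :=
  (PySem.List.pyRange (-(array.length : Int)) (array.length : Int)).flatMap (fun y =>
    (PySem.List.pyRange (-(pvWidthBound array : Int)) (pvWidthBound array : Int)).map (fun x => (x, y)))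

-- A's 'while True' loop: grow positions layer by layer from the border
def pvGoA (array : List (List Int)) (value : Int) (fuel : Nat)
    (positions border : PySem.Set (Int × Int)) : List (List Int) × (Int × Int) :=
  let temp : PySem.Set (Int × Int) :=
    border.foldl (fun tb p =>
      pvDirs.foldl (fun tb d =>
        let np := (p.1 + d.1, p.2 + d.2)
        if positions.contains np then tb
        else
          match pvLookup array np with
          | none => tb
          | some nv => if nv = value then tb.add np else tb) tb)
      PySem.Set.empty
  match border, fuel with
  | [], _ => pvBuildMask positions
  | _ :: _, 0 => pvBuildMask positions        -- fuel guard only; never reached (proved)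
  | _ :: _, f + 1 => pvGoA array value f (positions.union temp) temp

def find_shape (pos : Int × Int) (array : List (List Int)) : List (List Int) × (Int × Int) :=
  match pvLookup array pos with
  | none => ([], (0, 0))                      -- Python raises IndexError here: outside Pre_
  | some value =>
      pvGoA array value ((pvCells array).length + 2)
        (PySem.Set.ofList [pos]) (PySem.Set.ofList [pos])

-- ===== PORT B =====

-- B's 'while stack' loop: pop one cell (stack.pop() = last), push newly found cells
def pvGoB (array : List (List Int)) (value : Int) (fuel : Nat)
    (positions : PySem.Set (Int × Int)) (stack : List (Int × Int)) :
    List (List Int) × (Int × Int) :=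
  match PySem.List.pop? stack with
  | none => pvBuildMask positions
  | some (p, rest) =>
    match fuel with
    | 0 => pvBuildMask positions              -- fuel guard only; never reached (proved)
    | f + 1 =>
      let st := pvDirs.foldl (fun (st : PySem.Set (Int × Int) × List (Int × Int)) d =>
          let np := (p.1 + d.1, p.2 + d.2)
          if st.1.contains np then st
          else
            match pvLookup array np with
            | none => st
            | some nv => if nv = value then (st.1.add np, st.2 ++ [np]) else st)
        (positions, rest)
      pvGoB array value f st.1 st.2

def find_shape_alt (pos : Int × Int) (array : List (List Int)) : List (List Int) × (Int × Int) :=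
  match pvLookup array pos with
  | none => ([], (0, 0))                      -- Python raises IndexError here: outside Pre_
  | some value =>
      pvGoB array value (2 * (pvCells array).length + 2) (PySem.Set.ofList [pos]) [pos]

-- ===== PRECONDITION & SPEC =====
-- Pre_ excludes exactly the inputs where array[pos[1]][pos[0]] raises IndexError
-- (both A and B raise there); it excludes nothing on which A returns.
def Pre_find_shape (pos : Int × Int) (array : List (List Int)) : Prop :=
  (pvLookup array pos).isSome = true
instance (pos : Int × Int) (array : List (List Int)) : Decidable (Pre_find_shape pos array) := by
  unfold Pre_find_shape; infer_instance

def pvWitness_find_shape : (Int × Int) × List (List Int) := ((0, 0), [[5]])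

def Spec_find_shape (pos : Int × Int) (array : List (List Int)) (out : List (List Int) × (Int × Int)) : Prop := out = find_shape_alt pos array
instance (pos : Int × Int) (array : List (List Int)) (out : List (List Int) × (Int × Int)) : Decidable (Spec_find_shape pos array out) := by unfold Spec_find_shape; infer_instance

-- ===== CLAIM (what is proved, stated in full; the proofs are below) =====
def Claim_equal_find_shape : Prop := ∀ (pos : Int × Int) (array : List (List Int)), Dom_find_shape pos array → Pre_find_shape pos array → Spec_find_shape pos array (find_shape pos array)

-- ===== LEMMAS AND PROOFS =====

-- one flood-fill step: q is an 8-neighbour of p carrying the sought value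
def pvStep (array : List (List Int)) (value : Int) (p q : Int × Int) : Prop :=
  (∃ d ∈ pvDirs, q = (p.1 + d.1, p.2 + d.2)) ∧ pvLookup array q = some value

def pvReach (array : List (List Int)) (value : Int) (pos q : Int × Int) : Prop :=
  Relation.ReflTransGen (pvStep array value) pos q

lemma pvFoldMax_init_le : ∀ (l : List (List Int)) (a : Nat),
    a ≤ l.foldl (fun m row => max m row.length) a := by
  intro l
  induction l with
  | nil => intro a; simp
  | cons r t ih =>
    intro a
    simpa using le_trans (le_max_left a r.length) (ih (max a r.length))

lemma pvWidth_le_aux : ∀ (l : List (List Int)) (a : Nat) (row : List Int), row ∈ l →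
    row.length ≤ l.foldl (fun m row => max m row.length) a := by
  intro l
  induction l with
  | nil => intro a row h; simp at h
  | cons r t ih =>
    intro a row h
    rcases List.mem_cons.mp h with rfl | h
    · simpa using le_trans (le_max_right a row.length) (pvFoldMax_init_le t (max a row.length))
    · simpa using ih (max a r.length) row h

lemma pvWidth_le {array : List (List Int)} {row : List Int} (h : row ∈ array) :
    row.length ≤ pvWidthBound array :=
  pvWidth_le_aux array 0 row h

lemma pvLookup_mem_cells {array : List (List Int)} {q : Int × Int} {v : Int}
    (h : pvLookup array q = some v) : q ∈ pvCells array := by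
  unfold pvLookup at h
  rcases hy : PySem.List.pyGet? array q.2 with _ | row
  · rw [hy] at h; cases h
  · rw [hy] at h
    simp only at h
    have hy2 : PySem.Raise.InRange array.length q.2 := by
      by_contra hc
      rw [(PySem.List.pyGet?_eq_none_iff array q.2).mpr hc] at hy
      cases hy
    have hy2' : -(array.length : Int) ≤ q.2 ∧ q.2 < (array.length : Int) := Set.mem_Ico.mp hy2
    have hx2 : PySem.Raise.InRange row.length q.1 := by
      by_contra hc
      rw [(PySem.List.pyGet?_eq_none_iff row q.1).mpr hc] at h
      cases h
    have hx2' : -(row.length : Int) ≤ q.1 ∧ q.1 < (row.length : Int) := Set.mem_Ico.mp hx2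
    have hrow : row ∈ array := PySem.List.mem_of_pyGet?_eq_some array hy
    have hw : row.length ≤ pvWidthBound array := pvWidth_le hrow
    have hwi : (row.length : Int) ≤ (pvWidthBound array : Int) := by exact_mod_cast hw
    unfold pvCells
    rw [List.mem_flatMap]
    refine ⟨q.2, ?_, ?_⟩
    · rw [PySem.List.mem_pyRange_one]; exact ⟨hy2'.1, hy2'.2⟩
    · rw [List.mem_map]
      refine ⟨q.1, ?_, ?_⟩
      · rw [PySem.List.mem_pyRange_one]
        constructor
        · linarith [hx2'.1]
        · linarith [hx2'.2]
      · rfl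

lemma pvLen_le_cells {array : List (List Int)} {value : Int} {s : PySem.Set (Int × Int)}
    (hnd : s.Nodup) (hg : ∀ q ∈ s, pvLookup array q = some value) :
    s.length ≤ (pvCells array).length :=
  (List.subperm_of_subset hnd (fun q hq => pvLookup_mem_cells (hg q hq))).length_le

lemma pvMin_congr {l₁ l₂ : List Int} (h1 : l₁ ≠ []) (h2 : l₂ ≠ [])
    (h : ∀ x, x ∈ l₁ ↔ x ∈ l₂) :
    PySem.List.min? l₁ (fun v => v) = PySem.List.min? l₂ (fun v => v) := by
  rcases hm1 : PySem.List.min? l₁ (fun v => v) with _ | m₁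
  · exact absurd ((PySem.List.min?_eq_none_iff l₁ _).mp hm1) h1
  rcases hm2 : PySem.List.min? l₂ (fun v => v) with _ | m₂
  · exact absurd ((PySem.List.min?_eq_none_iff l₂ _).mp hm2) h2
  have e1 : m₁ ≤ m₂ := PySem.List.min?_isMin hm1 m₂ ((h m₂).mpr (PySem.List.min?_mem hm2))
  have e2 : m₂ ≤ m₁ := PySem.List.min?_isMin hm2 m₁ ((h m₁).mp (PySem.List.min?_mem hm1))
  rw [le_antisymm e1 e2]

lemma pvMax_congr {l₁ l₂ : List Int} (h1 : l₁ ≠ []) (h2 : l₂ ≠ [])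
    (h : ∀ x, x ∈ l₁ ↔ x ∈ l₂) :
    PySem.List.max? l₁ (fun v => v) = PySem.List.max? l₂ (fun v => v) := by
  rcases hm1 : PySem.List.max? l₁ (fun v => v) with _ | m₁
  · exact absurd ((PySem.List.max?_eq_none_iff l₁ _).mp hm1) h1
  rcases hm2 : PySem.List.max? l₂ (fun v => v) with _ | m₂
  · exact absurd ((PySem.List.max?_eq_none_iff l₂ _).mp hm2) h2
  have e1 : m₂ ≤ m₁ := PySem.List.max?_isMax hm1 m₂ ((h m₂).mpr (PySem.List.max?_mem hm2))
  have e2 : m₁ ≤ m₂ := PySem.List.max?_isMax hm2 m₁ ((h m₁).mp (PySem.List.max?_mem hm1))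
  rw [le_antisymm e2 e1]

lemma pvBuildMask_congr {s t : PySem.Set (Int × Int)} {pos : Int × Int}
    (hs : pos ∈ s) (ht : pos ∈ t) (h : ∀ q, q ∈ s ↔ q ∈ t) :
    pvBuildMask s = pvBuildMask t := by
  have hxs : ∀ x, x ∈ s.map Prod.fst ↔ x ∈ t.map Prod.fst := by
    intro x
    simp only [List.mem_map]
    constructor
    · rintro ⟨q, hq, rfl⟩; exact ⟨q, (h q).mp hq, rfl⟩
    · rintro ⟨q, hq, rfl⟩; exact ⟨q, (h q).mpr hq, rfl⟩
  have hys : ∀ y, y ∈ s.map Prod.snd ↔ y ∈ t.map Prod.snd := by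
    intro y
    simp only [List.mem_map]
    constructor
    · rintro ⟨q, hq, rfl⟩; exact ⟨q, (h q).mp hq, rfl⟩
    · rintro ⟨q, hq, rfl⟩; exact ⟨q, (h q).mpr hq, rfl⟩
  have hns : s.map Prod.fst ≠ [] := by
    intro hc; rw [List.map_eq_nil_iff] at hc; subst hc; cases hs
  have hnt : t.map Prod.fst ≠ [] := by
    intro hc; rw [List.map_eq_nil_iff] at hc; subst hc; cases ht
  have hns' : s.map Prod.snd ≠ [] := by
    intro hc; rw [List.map_eq_nil_iff] at hc; subst hc; cases hs
  have hnt' : t.map Prod.snd ≠ [] := by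
    intro hc; rw [List.map_eq_nil_iff] at hc; subst hc; cases ht
  have hcon : ∀ q, PySem.Set.contains s q = PySem.Set.contains t q := by
    intro q
    rw [Bool.eq_iff_iff, PySem.Set.contains_iff, PySem.Set.contains_iff]
    exact h q
  unfold pvBuildMask
  simp only [pvMin_congr hns hnt hxs, pvMin_congr hns' hnt' hys,
    pvMax_congr hns hnt hxs, pvMax_congr hns' hnt' hys, hcon]

-- characterization of A's inner (directions) fold
lemma pvTempInner_spec (array : List (List Int)) (value : Int)
    (positions : PySem.Set (Int × Int)) (p : Int × Int) :
    ∀ (ds : List (Int × Int)) (tb : PySem.Set (Int × Int)), tb.Nodup →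
    (ds.foldl (fun tb d =>
        let np := (p.1 + d.1, p.2 + d.2)
        if positions.contains np then tb
        else
          match pvLookup array np with
          | none => tb
          | some nv => if nv = value then tb.add np else tb) tb).Nodup ∧
    (∀ q, q ∈ (ds.foldl (fun tb d =>
        let np := (p.1 + d.1, p.2 + d.2)
        if positions.contains np then tb
        else
          match pvLookup array np with
          | none => tb
          | some nv => if nv = value then tb.add np else tb) tb) ↔
      q ∈ tb ∨ ((∃ d ∈ ds, q = (p.1 + d.1, p.2 + d.2)) ∧ pvLookup array q = some value ∧ q ∉ positions)) := by
  intro ds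
  induction ds with
  | nil =>
    intro tb hnd
    refine ⟨hnd, fun q => ?_⟩
    simp
  | cons d ds ih =>
    intro tb hnd
    rw [List.foldl_cons]
    have hiff : ∀ (tb' : PySem.Set (Int × Int)), tb'.Nodup →
        (∀ q, q ∈ tb' ↔ q ∈ tb ∨ (q = (p.1 + d.1, p.2 + d.2) ∧ pvLookup array q = some value ∧ q ∉ positions)) →
        (List.foldl (fun tb d =>
          let np := (p.1 + d.1, p.2 + d.2)
          if positions.contains np then tb
          else
            match pvLookup array np with
            | none => tb
            | some nv => if nv = value then tb.add np else tb) tb' ds).Nodup ∧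
        (∀ q, q ∈ (List.foldl (fun tb d =>
          let np := (p.1 + d.1, p.2 + d.2)
          if positions.contains np then tb
          else
            match pvLookup array np with
            | none => tb
            | some nv => if nv = value then tb.add np else tb) tb' ds) ↔
          q ∈ tb ∨ ((∃ d' ∈ d :: ds, q = (p.1 + d'.1, p.2 + d'.2)) ∧ pvLookup array q = some value ∧ q ∉ positions)) := by
      intro tb' hnd' hchar
      obtain ⟨ihn, ihq⟩ := ih tb' hnd'
      refine ⟨ihn, fun q => ?_⟩
      rw [ihq q, List.exists_mem_cons_iff]
      rw [hchar q]
      constructor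
      · rintro ((h | h) | h)
        · exact Or.inl h
        · exact Or.inr ⟨Or.inl h.1, h.2.1, h.2.2⟩
        · exact Or.inr ⟨Or.inr h.1, h.2.1, h.2.2⟩
      · rintro (h | ⟨(he | hex), hg, hnp⟩)
        · exact Or.inl (Or.inl h)
        · exact Or.inl (Or.inr ⟨he, hg, hnp⟩)
        · exact Or.inr ⟨hex, hg, hnp⟩
    by_cases hc : positions.contains (p.1 + d.1, p.2 + d.2) = true
    · have hmem : (p.1 + d.1, p.2 + d.2) ∈ positions := (PySem.Set.contains_iff _ _).mp hc
      have hstep : (let np := (p.1 + d.1, p.2 + d.2)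
          if positions.contains np then tb
          else
            match pvLookup array np with
            | none => tb
            | some nv => if nv = value then tb.add np else tb) = tb := by
        simp [hmem]
      rw [hstep]
      refine hiff tb hnd (fun q => ?_)
      constructor
      · exact fun h => Or.inl h
      · rintro (h | ⟨rfl, hg, hnp⟩)
        · exact h
        · exact absurd hmem hnp
    · have hnmem : (p.1 + d.1, p.2 + d.2) ∉ positions := fun hm =>
        hc ((PySem.Set.contains_iff _ _).mpr hm)
      rcases hl : pvLookup array (p.1 + d.1, p.2 + d.2) with _ | nv
      · have hstep : (let np := (p.1 + d.1, p.2 + d.2)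
            if positions.contains np then tb
            else
              match pvLookup array np with
              | none => tb
              | some nv => if nv = value then tb.add np else tb) = tb := by
          simp [hnmem, hl]
        rw [hstep]
        refine hiff tb hnd (fun q => ?_)
        constructor
        · exact fun h => Or.inl h
        · rintro (h | ⟨rfl, hg, hnp⟩)
          · exact h
          · rw [hl] at hg; cases hg
      · by_cases hv : nv = value
        · have hstep : (let np := (p.1 + d.1, p.2 + d.2)
              if positions.contains np then tb
              else
                match pvLookup array np with
                | none => tb
                | some nv => if nv = value then tb.add np else tb) = tb.add (p.1 + d.1, p.2 + d.2) := by
            simp [hnmem, hl, hv]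
          rw [hstep]
          refine hiff (tb.add (p.1 + d.1, p.2 + d.2)) (PySem.Set.nodup_add _ _ hnd) (fun q => ?_)
          rw [PySem.Set.mem_add]
          subst hv
          constructor
          · rintro (h | rfl)
            · exact Or.inl h
            · exact Or.inr ⟨rfl, hl, hnmem⟩
          · rintro (h | ⟨rfl, hg, hnp⟩)
            · exact Or.inl h
            · exact Or.inr rfl
        · have hstep : (let np := (p.1 + d.1, p.2 + d.2)
              if positions.contains np then tb
              else
                match pvLookup array np with
                | none => tb
                | some nv => if nv = value then tb.add np else tb) = tb := by
            simp [hnmem, hl, hv]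
          rw [hstep]
          refine hiff tb hnd (fun q => ?_)
          constructor
          · exact fun h => Or.inl h
          · rintro (h | ⟨rfl, hg, hnp⟩)
            · exact h
            · rw [hl] at hg; exact absurd (Option.some.inj hg) hv

-- characterization of A's border fold (temp_borders)
lemma pvTempOuter_spec (array : List (List Int)) (value : Int)
    (positions : PySem.Set (Int × Int)) :
    ∀ (bs : List (Int × Int)) (tb : PySem.Set (Int × Int)), tb.Nodup →
    (bs.foldl (fun tb p =>
      pvDirs.foldl (fun tb d =>
        let np := (p.1 + d.1, p.2 + d.2)
        if positions.contains np then tb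
        else
          match pvLookup array np with
          | none => tb
          | some nv => if nv = value then tb.add np else tb) tb) tb).Nodup ∧
    (∀ q, q ∈ (bs.foldl (fun tb p =>
      pvDirs.foldl (fun tb d =>
        let np := (p.1 + d.1, p.2 + d.2)
        if positions.contains np then tb
        else
          match pvLookup array np with
          | none => tb
          | some nv => if nv = value then tb.add np else tb) tb) tb) ↔
      q ∈ tb ∨ ∃ p ∈ bs, pvStep array value p q ∧ q ∉ positions) := by
  intro bs
  induction bs with
  | nil =>
    intro tb hnd
    refine ⟨hnd, fun q => ?_⟩
    simp
  | cons p bs ih =>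
    intro tb hnd
    rw [List.foldl_cons]
    obtain ⟨n1, c1⟩ := pvTempInner_spec array value positions p pvDirs tb hnd
    obtain ⟨ihn, ihq⟩ := ih _ n1
    refine ⟨ihn, fun q => ?_⟩
    rw [ihq q, c1 q, List.exists_mem_cons_iff]
    constructor
    · rintro ((h | ⟨hex, hg, hnp⟩) | ⟨p', hp', hs, hnp⟩)
      · exact Or.inl h
      · exact Or.inr (Or.inl ⟨⟨hex, hg⟩, hnp⟩)
      · exact Or.inr (Or.inr ⟨p', hp', hs, hnp⟩)
    · rintro (h | (⟨⟨hex, hg⟩, hnp⟩ | ⟨p', hp', hs, hnp⟩))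
      · exact Or.inl (Or.inl h)
      · exact Or.inl (Or.inr ⟨hex, hg, hnp⟩)
      · exact Or.inr ⟨p', hp', hs, hnp⟩

lemma pvClosed_reach {array : List (List Int)} {value : Int} {pos : Int × Int}
    (positions : PySem.Set (Int × Int)) (hpos : pos ∈ positions)
    (hreach : ∀ q ∈ positions, pvReach array value pos q)
    (hclosed : ∀ p ∈ positions, ∀ q, pvStep array value p q → q ∈ positions) :
    ∀ q, q ∈ positions ↔ pvReach array value pos q := by
  intro q
  constructor
  · exact hreach q
  · intro h
    induction h with
    | refl => exact hpos
    | tail h1 hstep ih => exact hclosed _ ih _ hstep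

lemma pvGoA_spec (array : List (List Int)) (value : Int) (pos : Int × Int) :
    ∀ (fuel : Nat) (positions border : PySem.Set (Int × Int)),
    positions.Nodup →
    pos ∈ positions →
    (∀ q ∈ positions, pvLookup array q = some value) →
    (∀ q ∈ border, q ∈ positions) →
    (∀ q ∈ positions, pvReach array value pos q) →
    (∀ p ∈ positions, p ∉ border → ∀ q, pvStep array value p q → q ∈ positions) →
    (border = [] ∨ (pvCells array).length + 2 ≤ fuel + positions.length) →
    ∃ S : PySem.Set (Int × Int),
      pvGoA array value fuel positions border = pvBuildMask S ∧
      pos ∈ S ∧ (∀ q, q ∈ S ↔ pvReach array value pos q) := by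
  intro fuel
  induction fuel with
  | zero =>
    intro positions border hnd hpos hgood hbp hreach hclosed hfuel
    cases border with
    | nil =>
      refine ⟨positions, ?_, hpos, ?_⟩
      · rfl
      · exact pvClosed_reach positions hpos hreach
          (fun p hp q hs => hclosed p hp (by simp) q hs)
    | cons b bs =>
      exfalso
      rcases hfuel with h | h
      · cases h
      · have := pvLen_le_cells hnd hgood
        omega
  | succ f ihf =>
    intro positions border hnd hpos hgood hbp hreach hclosed hfuel
    cases border with
    | nil =>
      refine ⟨positions, ?_, hpos, ?_⟩
      · rfl
      · exact pvClosed_reach positions hpos hreach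
          (fun p hp q hs => hclosed p hp (by simp) q hs)
    | cons b bs =>
      obtain ⟨tn, tc⟩ := pvTempOuter_spec array value positions (b :: bs)
        PySem.Set.empty List.nodup_nil
      set temp := (b :: bs).foldl (fun tb p =>
        pvDirs.foldl (fun tb d =>
          let np := (p.1 + d.1, p.2 + d.2)
          if positions.contains np then tb
          else
            match pvLookup array np with
            | none => tb
            | some nv => if nv = value then tb.add np else tb) tb)
        PySem.Set.empty with htemp
      have tc' : ∀ q, q ∈ temp ↔ ∃ p ∈ b :: bs, pvStep array value p q ∧ q ∉ positions := by
        intro q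
        rw [tc q]
        simp [PySem.Set.empty]
      have hrec : pvGoA array value (f + 1) positions (b :: bs)
          = pvGoA array value f (positions.union temp) temp := by
        rw [pvGoA]
      rw [hrec]
      apply ihf (positions.union temp) temp
      · exact PySem.Set.nodup_union _ _ hnd
      · exact (PySem.Set.mem_union _ _ _).mpr (Or.inl hpos)
      · intro q hq
        rcases (PySem.Set.mem_union _ _ _).mp hq with h | h
        · exact hgood q h
        · exact ((tc' q).mp h).choose_spec.2.1.2
      · intro q hq
        exact (PySem.Set.mem_union _ _ _).mpr (Or.inr hq)
      · intro q hq
        rcases (PySem.Set.mem_union _ _ _).mp hq with h | h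
        · exact hreach q h
        · obtain ⟨p', hp', hs, _⟩ := (tc' q).mp h
          exact Relation.ReflTransGen.tail (hreach p' (hbp p' hp')) hs
      · intro p' hp' hnt q hs
        rcases (PySem.Set.mem_union _ _ _).mp hp' with h | h
        · by_cases hb : p' ∈ b :: bs
          · by_cases hq : q ∈ positions
            · exact (PySem.Set.mem_union _ _ _).mpr (Or.inl hq)
            · exact (PySem.Set.mem_union _ _ _).mpr (Or.inr ((tc' q).mpr ⟨p', hb, hs, hq⟩))
          · exact (PySem.Set.mem_union _ _ _).mpr (Or.inl (hclosed p' h hb q hs))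
        · exact absurd h hnt
      · rcases htempe : temp with _ | ⟨t, ts⟩
        · exact Or.inl rfl
        · right
          have hfuel' : (pvCells array).length + 2 ≤ (f + 1) + positions.length := by
            rcases hfuel with h | h
            · cases h
            · exact h
          have htmem : t ∈ temp := by rw [htempe]; simp
          have htnp : t ∉ positions := ((tc' t).mp htmem).choose_spec.2.2
          have hsub : positions ++ [t] ⊆ positions.union temp := by
            intro q hq
            rcases List.mem_append.mp hq with h | h
            · exact (PySem.Set.mem_union _ _ _).mpr (Or.inl h)
            · rw [List.mem_singleton.mp h]
              exact (PySem.Set.mem_union _ _ _).mpr (Or.inr htmem)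
          have hndt : (positions ++ [t]).Nodup := by
            rw [List.nodup_append]
            refine ⟨hnd, List.nodup_singleton _, ?_⟩
            intro q hq q' hq'
            rw [List.mem_singleton.mp hq']
            intro he
            exact htnp (he ▸ hq)
          have hlen : positions.length + 1 ≤ (positions.union temp).length := by
            have h := (List.subperm_of_subset hndt hsub).length_le
            rw [List.length_append, List.length_singleton] at h
            exact h
          rw [htempe] at hlen
          omega
      
-- characterization of B's directions fold (positions, stack)
lemma pvStepFold_spec (array : List (List Int)) (value : Int) (p : Int × Int) :
    ∀ (ds : List (Int × Int)) (s0 : PySem.Set (Int × Int)) (st0 : List (Int × Int)), s0.Nodup →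
    ((ds.foldl (fun (st : PySem.Set (Int × Int) × List (Int × Int)) d =>
          let np := (p.1 + d.1, p.2 + d.2)
          if st.1.contains np then st
          else
            match pvLookup array np with
            | none => st
            | some nv => if nv = value then (st.1.add np, st.2 ++ [np]) else st)
        (s0, st0)).1.Nodup) ∧
    (∀ q ∈ s0, q ∈ (ds.foldl (fun (st : PySem.Set (Int × Int) × List (Int × Int)) d =>
          let np := (p.1 + d.1, p.2 + d.2)
          if st.1.contains np then st
          else
            match pvLookup array np with
            | none => st
            | some nv => if nv = value then (st.1.add np, st.2 ++ [np]) else st)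
        (s0, st0)).1) ∧
    (∀ q, q ∈ (ds.foldl (fun (st : PySem.Set (Int × Int) × List (Int × Int)) d =>
          let np := (p.1 + d.1, p.2 + d.2)
          if st.1.contains np then st
          else
            match pvLookup array np with
            | none => st
            | some nv => if nv = value then (st.1.add np, st.2 ++ [np]) else st)
        (s0, st0)).1 ↔
      q ∈ s0 ∨ ((∃ d ∈ ds, q = (p.1 + d.1, p.2 + d.2)) ∧ pvLookup array q = some value)) ∧
    (∀ q, q ∈ (ds.foldl (fun (st : PySem.Set (Int × Int) × List (Int × Int)) d =>
          let np := (p.1 + d.1, p.2 + d.2)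
          if st.1.contains np then st
          else
            match pvLookup array np with
            | none => st
            | some nv => if nv = value then (st.1.add np, st.2 ++ [np]) else st)
        (s0, st0)).2 ↔
      q ∈ st0 ∨ (q ∈ (ds.foldl (fun (st : PySem.Set (Int × Int) × List (Int × Int)) d =>
          let np := (p.1 + d.1, p.2 + d.2)
          if st.1.contains np then st
          else
            match pvLookup array np with
            | none => st
            | some nv => if nv = value then (st.1.add np, st.2 ++ [np]) else st)
        (s0, st0)).1 ∧ q ∉ s0)) ∧
    ((ds.foldl (fun (st : PySem.Set (Int × Int) × List (Int × Int)) d =>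
          let np := (p.1 + d.1, p.2 + d.2)
          if st.1.contains np then st
          else
            match pvLookup array np with
            | none => st
            | some nv => if nv = value then (st.1.add np, st.2 ++ [np]) else st)
        (s0, st0)).1.length + st0.length =
      s0.length + (ds.foldl (fun (st : PySem.Set (Int × Int) × List (Int × Int)) d =>
          let np := (p.1 + d.1, p.2 + d.2)
          if st.1.contains np then st
          else
            match pvLookup array np with
            | none => st
            | some nv => if nv = value then (st.1.add np, st.2 ++ [np]) else st)
        (s0, st0)).2.length) := by
  intro ds
  induction ds with
  | nil =>
    intro s0 st0 hnd
    refine ⟨hnd, fun q h => h, fun q => ?_, fun q => ?_, rfl⟩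
    · simp
    · simp only [List.foldl_nil]
      constructor
      · exact fun h => Or.inl h
      · rintro (h | ⟨h1, h2⟩)
        · exact h
        · exact absurd h1 h2
  | cons d ds ih =>
    intro s0 st0 hnd
    rw [List.foldl_cons]
    by_cases hc : s0.contains (p.1 + d.1, p.2 + d.2) = true
    case pos =>
      have hmem : (p.1 + d.1, p.2 + d.2) ∈ s0 := (PySem.Set.contains_iff _ _).mp hc
      have hstep : (let np := (p.1 + d.1, p.2 + d.2)
          if (s0, st0).1.contains np then (s0, st0)
          else
            match pvLookup array np with
            | none => (s0, st0)
            | some nv => if nv = value then ((s0, st0).1.add np, (s0, st0).2 ++ [np]) else (s0, st0))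
          = (s0, st0) := by simp [hmem]
      rw [hstep]
      obtain ⟨ihn, ihm, ihc1, ihc2, ihl⟩ := ih s0 st0 hnd
      refine ⟨ihn, ihm, fun q => ?_, ihc2, ihl⟩
      rw [ihc1 q, List.exists_mem_cons_iff]
      constructor
      · rintro (h | h)
        · exact Or.inl h
        · exact Or.inr ⟨Or.inr h.1, h.2⟩
      · rintro (h | ⟨(rfl | hex), hg⟩)
        · exact Or.inl h
        · exact Or.inl hmem
        · exact Or.inr ⟨hex, hg⟩
    case neg =>
      have hnmem : (p.1 + d.1, p.2 + d.2) ∉ s0 := fun hm =>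
        hc ((PySem.Set.contains_iff _ _).mpr hm)
      rcases hl : pvLookup array (p.1 + d.1, p.2 + d.2) with _ | nv
      · have hstep : (let np := (p.1 + d.1, p.2 + d.2)
            if (s0, st0).1.contains np then (s0, st0)
            else
              match pvLookup array np with
              | none => (s0, st0)
              | some nv => if nv = value then ((s0, st0).1.add np, (s0, st0).2 ++ [np]) else (s0, st0))
            = (s0, st0) := by simp [hnmem, hl]
        rw [hstep]
        obtain ⟨ihn, ihm, ihc1, ihc2, ihl'⟩ := ih s0 st0 hnd
        refine ⟨ihn, ihm, fun q => ?_, ihc2, ihl'⟩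
        rw [ihc1 q, List.exists_mem_cons_iff]
        constructor
        · rintro (h | h)
          · exact Or.inl h
          · exact Or.inr ⟨Or.inr h.1, h.2⟩
        · rintro (h | ⟨(rfl | hex), hg⟩)
          · exact Or.inl h
          · rw [hl] at hg; cases hg
          · exact Or.inr ⟨hex, hg⟩
      · by_cases hv : nv = value
        · have hstep : (let np := (p.1 + d.1, p.2 + d.2)
              if (s0, st0).1.contains np then (s0, st0)
              else
                match pvLookup array np with
                | none => (s0, st0)
                | some nv => if nv = value then ((s0, st0).1.add np, (s0, st0).2 ++ [np]) else (s0, st0))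
              = (s0.add (p.1 + d.1, p.2 + d.2), st0 ++ [(p.1 + d.1, p.2 + d.2)]) := by
            simp [hnmem, hl, hv]
          rw [hstep]
          subst hv
          obtain ⟨ihn, ihm, ihc1, ihc2, ihl'⟩ :=
            ih (s0.add (p.1 + d.1, p.2 + d.2)) (st0 ++ [(p.1 + d.1, p.2 + d.2)])
              (PySem.Set.nodup_add _ _ hnd)
          have hmono : ∀ q ∈ s0, q ∈ _ := fun q hq =>
            ihm q ((PySem.Set.mem_add _ _ _).mpr (Or.inl hq))
          have hnpr : (p.1 + d.1, p.2 + d.2) ∈ _ :=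
            ihm _ ((PySem.Set.mem_add _ _ _).mpr (Or.inr rfl))
          refine ⟨ihn, hmono, fun q => ?_, fun q => ?_, ?_⟩
          · rw [ihc1 q, PySem.Set.mem_add, List.exists_mem_cons_iff]
            constructor
            · rintro ((h | rfl) | h)
              · exact Or.inl h
              · exact Or.inr ⟨Or.inl rfl, hl⟩
              · exact Or.inr ⟨Or.inr h.1, h.2⟩
            · rintro (h | ⟨(rfl | hex), hg⟩)
              · exact Or.inl (Or.inl h)
              · exact Or.inl (Or.inr rfl)
              · exact Or.inr ⟨hex, hg⟩
          · rw [ihc2 q, List.mem_append, List.mem_singleton]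
            constructor
            · rintro ((h | rfl) | ⟨h1, h2⟩)
              · exact Or.inl h
              · exact Or.inr ⟨hnpr, hnmem⟩
              · exact Or.inr ⟨h1, fun hq => h2 ((PySem.Set.mem_add _ _ _).mpr (Or.inl hq))⟩
            · rintro (h | ⟨h1, h2⟩)
              · exact Or.inl (Or.inl h)
              · by_cases he : q = (p.1 + d.1, p.2 + d.2)
                · exact Or.inl (Or.inr he)
                · refine Or.inr ⟨h1, fun hq => ?_⟩
                  rcases (PySem.Set.mem_add _ _ _).mp hq with h' | h'
                  · exact h2 h'
                  · exact he h'
          · have hadd : (s0.add (p.1 + d.1, p.2 + d.2)).length = s0.length + 1 := by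
              simp [PySem.Set.add, hnmem]
            rw [List.length_append, List.length_singleton] at ihl'
            rw [hadd] at ihl'
            omega
        · have hstep : (let np := (p.1 + d.1, p.2 + d.2)
              if (s0, st0).1.contains np then (s0, st0)
              else
                match pvLookup array np with
                | none => (s0, st0)
                | some nv => if nv = value then ((s0, st0).1.add np, (s0, st0).2 ++ [np]) else (s0, st0))
              = (s0, st0) := by simp [hnmem, hl, hv]
          rw [hstep]
          obtain ⟨ihn, ihm, ihc1, ihc2, ihl'⟩ := ih s0 st0 hnd
          refine ⟨ihn, ihm, fun q => ?_, ihc2, ihl'⟩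
          rw [ihc1 q, List.exists_mem_cons_iff]
          constructor
          · rintro (h | h)
            · exact Or.inl h
            · exact Or.inr ⟨Or.inr h.1, h.2⟩
          · rintro (h | ⟨(rfl | hex), hg⟩)
            · exact Or.inl h
            · rw [hl] at hg; exact absurd (Option.some.inj hg) hv
            · exact Or.inr ⟨hex, hg⟩

lemma pvGoB_spec (array : List (List Int)) (value : Int) (pos : Int × Int) :
    ∀ (fuel : Nat) (positions : PySem.Set (Int × Int)) (stack : List (Int × Int)),
    positions.Nodup →
    pos ∈ positions →
    (∀ q ∈ positions, pvLookup array q = some value) →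
    (∀ q ∈ stack, q ∈ positions) →
    (∀ q ∈ positions, pvReach array value pos q) →
    (∀ p ∈ positions, p ∉ stack → ∀ q, pvStep array value p q → q ∈ positions) →
    (stack.length + 2 * (pvCells array).length + 1 ≤ fuel + 2 * positions.length) →
    ∃ S : PySem.Set (Int × Int),
      pvGoB array value fuel positions stack = pvBuildMask S ∧
      pos ∈ S ∧ (∀ q, q ∈ S ↔ pvReach array value pos q) := by
  intro fuel
  induction fuel with
  | zero =>
    intro positions stack hnd hpos hgood hsp hreach hclosed hfuel
    rcases List.eq_nil_or_concat stack with rfl | ⟨xs, px, rfl⟩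
    · refine ⟨positions, rfl, hpos, ?_⟩
      exact pvClosed_reach positions hpos hreach
        (fun p hp q hs => hclosed p hp (by simp) q hs)
    · exfalso
      rw [List.concat_eq_append, List.length_append, List.length_singleton] at hfuel
      have := pvLen_le_cells hnd hgood
      omega
  | succ f ihf =>
    intro positions stack hnd hpos hgood hsp hreach hclosed hfuel
    rcases List.eq_nil_or_concat stack with rfl | ⟨xs, px, rfl⟩
    · refine ⟨positions, rfl, hpos, ?_⟩
      exact pvClosed_reach positions hpos hreach
        (fun p hp q hs => hclosed p hp (by simp) q hs)
    · rw [List.concat_eq_append] at hsp hclosed hfuel ⊢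
      have hpx : px ∈ positions := hsp px (by simp)
      have hrec : pvGoB array value (f + 1) positions (xs ++ [px])
          = pvGoB array value f
              (pvDirs.foldl (fun (st : PySem.Set (Int × Int) × List (Int × Int)) d =>
                  let np := (px.1 + d.1, px.2 + d.2)
                  if st.1.contains np then st
                  else
                    match pvLookup array np with
                    | none => st
                    | some nv => if nv = value then (st.1.add np, st.2 ++ [np]) else st)
                (positions, xs)).1
              (pvDirs.foldl (fun (st : PySem.Set (Int × Int) × List (Int × Int)) d =>
                  let np := (px.1 + d.1, px.2 + d.2)
                  if st.1.contains np then st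
                  else
                    match pvLookup array np with
                    | none => st
                    | some nv => if nv = value then (st.1.add np, st.2 ++ [np]) else st)
                (positions, xs)).2 := by
        rw [pvGoB.eq_def, PySem.List.pop?_last]
      rw [hrec]
      obtain ⟨fn, fm, fc1, fc2, fl⟩ := pvStepFold_spec array value px pvDirs positions xs hnd
      apply ihf
      · exact fn
      · exact fm pos hpos
      · intro q hq
        rcases (fc1 q).mp hq with h | ⟨_, hg⟩
        · exact hgood q h
        · exact hg
      · intro q hq
        rcases (fc2 q).mp hq with h | ⟨h1, _⟩
        · exact fm q (hsp q (List.mem_append.mpr (Or.inl h)))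
        · exact h1
      · intro q hq
        rcases (fc1 q).mp hq with h | ⟨hex, hg⟩
        · exact hreach q h
        · exact Relation.ReflTransGen.tail (hreach px hpx) ⟨hex, hg⟩
      · intro p' hp' hnt q hs
        by_cases hp0 : p' ∈ positions
        · by_cases hpe : p' = px
          · subst hpe
            exact (fc1 q).mpr (Or.inr ⟨hs.1, hs.2⟩)
          · by_cases hpxs : p' ∈ xs
            · exact absurd ((fc2 p').mpr (Or.inl hpxs)) hnt
            · have hns : p' ∉ xs ++ [px] := by
                rw [List.mem_append, List.mem_singleton]
                rintro (h | h)
                · exact hpxs h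
                · exact hpe h
              exact fm q (hclosed p' hp0 hns q hs)
        · exact absurd ((fc2 p').mpr (Or.inr ⟨hp', hp0⟩)) hnt
      · have hple : positions.length ≤ (pvDirs.foldl (fun (st : PySem.Set (Int × Int) × List (Int × Int)) d =>
                  let np := (px.1 + d.1, px.2 + d.2)
                  if st.1.contains np then st
                  else
                    match pvLookup array np with
                    | none => st
                    | some nv => if nv = value then (st.1.add np, st.2 ++ [np]) else st)
                (positions, xs)).1.length :=
          (List.subperm_of_subset hnd (fun q hq => fm q hq)).length_le
        rw [List.length_append, List.length_singleton] at hfuel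
        omega

-- ===== VERDICT (by name: the statement is the Claim_ definition above) =====
theorem find_shape_spec : Claim_equal_find_shape := by
  intro pos array _ hpre
  unfold Pre_find_shape at hpre
  obtain ⟨value, hv⟩ := Option.isSome_iff_exists.mp hpre
  show find_shape pos array = find_shape_alt pos array
  unfold find_shape find_shape_alt
  rw [hv]
  have hofl : PySem.Set.ofList [pos] = [pos] := rfl
  have hnd : (PySem.Set.ofList [pos]).Nodup := PySem.Set.nodup_ofList _
  have hposm : pos ∈ PySem.Set.ofList [pos] := by rw [hofl]; simp
  have hgood : ∀ q ∈ PySem.Set.ofList [pos], pvLookup array q = some value := by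
    intro q hq
    rw [hofl, List.mem_singleton] at hq
    rw [hq, hv]
  have hreach : ∀ q ∈ PySem.Set.ofList [pos], pvReach array value pos q := by
    intro q hq
    rw [hofl, List.mem_singleton] at hq
    rw [hq]
    exact Relation.ReflTransGen.refl
  obtain ⟨SA, hA, hposA, hqA⟩ := pvGoA_spec array value pos ((pvCells array).length + 2)
    (PySem.Set.ofList [pos]) (PySem.Set.ofList [pos]) hnd hposm hgood (fun q hq => hq)
    hreach (fun p hp hnp _ _ => absurd hp hnp) (Or.inr (by omega))
  obtain ⟨SB, hB, hposB, hqB⟩ := pvGoB_spec array value pos (2 * (pvCells array).length + 2)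
    (PySem.Set.ofList [pos]) [pos] hnd hposm hgood
    (fun q hq => by rw [hofl]; exact hq) hreach
    (fun p hp hnp => by
      rw [hofl, List.mem_singleton] at hp
      exact absurd (hp ▸ List.mem_singleton_self pos) hnp)
    (by simp; omega)
  show pvGoA array value ((pvCells array).length + 2) (PySem.Set.ofList [pos]) (PySem.Set.ofList [pos])
      = pvGoB array value (2 * (pvCells array).length + 2) (PySem.Set.ofList [pos]) [pos]
  rw [hA, hB]
  exact pvBuildMask_congr hposA hposB (fun q => (hqA q).trans (hqB q).symm)
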